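-- pv_equiv track=rewrite | github.com/xcy103/personal_python_algorithm_note | technique/DP/经典线性DP/3654. Minimum Sum After Divisible Sum Deletions.py | minArraySum
-- ===== SOURCE A (Python) =====
-- min = lambda a, b: b if b < a else a
--
-- inf = 10**18
--
-- def minArraySum(nums, k: int) -> int:
--     min_f = [inf] * k
--     min_f[0] = 0  # s[0] = 0，对应的 f[0] = 0
--     f = s = 0
--     for x in nums:
--         s = (s + x) % k
--         # 不删除 x，那么转移来源为 f + x
--         # 删除以 x 结尾的子数组，问题变成剩余前缀的最小和
--         # 其中剩余前缀的元素和模 k 等于 s，对应的 f 值的最小值记录在 min_f[s] 中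
--         f = min(f + x, min_f[s])
--         # 维护前缀和 s 对应的最小和，由于上面计算了 min，这里无需再计算 min
--         min_f[s] = f
--     return f
-- ===== SOURCE B (Python) =====
-- def minArraySum(nums, k: int) -> int:
--     # Quadratic prefix-sum DP: f[i] = min sum of nums[:i] after deletions.
--     # For each i, scan all earlier prefixes j and allow deleting nums[j:i]
--     # when its sum (pre[i]-pre[j]) is divisible by k.
--     INF = 10 ** 18
--     n = len(nums)
--     s = 0
--     pre = [0]
--     for x in nums:
--         s += x
--         pre.append(s)
--     f = [0]
--     for i in range(1, n + 1):
--         best = INF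
--         for j in range(i):
--             if (pre[i] - pre[j]) % k == 0:
--                 if f[j] < best:
--                     best = f[j]
--         keep = f[i - 1] + nums[i - 1]
--         f.append(keep if keep < best else best)
--     return f[n]
-- ===== Notes on version B (the rewrite author's own statement) =====
-- stated objective: alternative
-- what changed: B drops A's residue-indexed table and single pass entirely: it computes the prefix-sum array once and then, for every prefix end i, rescans all earlier prefixes j to find a deletable k-divisible block nums[j:i], a plain quadratic DP over prefix pairs.
import Mathlib
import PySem

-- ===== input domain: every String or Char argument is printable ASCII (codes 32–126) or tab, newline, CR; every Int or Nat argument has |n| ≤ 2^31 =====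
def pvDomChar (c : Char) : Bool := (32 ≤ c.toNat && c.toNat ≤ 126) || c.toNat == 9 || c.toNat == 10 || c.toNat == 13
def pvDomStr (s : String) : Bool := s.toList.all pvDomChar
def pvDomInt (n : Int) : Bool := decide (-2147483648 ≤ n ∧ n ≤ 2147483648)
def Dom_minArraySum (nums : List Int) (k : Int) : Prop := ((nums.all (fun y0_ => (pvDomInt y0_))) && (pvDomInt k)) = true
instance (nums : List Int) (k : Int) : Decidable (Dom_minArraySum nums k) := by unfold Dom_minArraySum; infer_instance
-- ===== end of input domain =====

-- B replaces A's O(n+k) residue-table single pass by a quadratic prefix-sum DP that,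
-- for each prefix end, rescans all earlier prefixes for a deletable (k-divisible) block
-- (objective: alternative — plainer recurrence, no residue table, slower asymptotics).

-- ===== PORT A =====
def pvInf : Int := 10 ^ 18

-- A's loop; state (min_f, f, s).  min_f[s] read/write: s = (s+x) % k ∈ [0,k)
-- under Pre_ (k ≥ 1), so .getD s.toNat / .set s.toNat are exact for Python indexing.
def minArraySumLoop (k : Int) (min_f : List Int) (f s : Int) : List Int → Int
  | [] => f
  | x :: rest =>
      let s' := PySem.Int.mod (s + x) k
      let m := min_f.getD s'.toNat 0
      -- A's module-level `min` lambda: b if b < a else a, with a = f + x, b = min_f[s]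
      let f' := if m < f + x then m else f + x
      minArraySumLoop k (min_f.set s'.toNat f') f' s' rest

def minArraySum (nums : List Int) (k : Int) : Int :=
  minArraySumLoop k ((List.replicate k.toNat pvInf).set 0 0) 0 0 nums

-- ===== PORT B =====
def pvINF : Int := 10 ^ 18

-- `s += x; pre.append(s)` loop; the caller prepends the initial `pre = [0]`.
def altPreLoop : List Int → Int → List Int
  | [], _ => []
  | x :: rest, s => (s + x) :: altPreLoop rest (s + x)

-- B's inner loop: `best = INF; for j in range(i): ...` (indices are in range, so .getD is exact)
def altBest (k : Int) (pre f : List Int) (i : Nat) : Int :=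
  (List.range i).foldl (fun best j =>
    if PySem.Int.mod (pre.getD i 0 - pre.getD j 0) k = 0 then
      (if f.getD j 0 < best then f.getD j 0 else best)
    else best) pvINF

-- one iteration of B's outer loop (`f.append(keep if keep < best else best)`)
def altStep (k : Int) (nums pre f : List Int) (idx : Nat) : List Int :=
  let i := idx + 1
  let best := altBest k pre f i
  let keep := f.getD (i - 1) 0 + nums.getD (i - 1) 0
  f ++ [if keep < best then keep else best]

def minArraySum_alt (nums : List Int) (k : Int) : Int :=
  let pre := 0 :: altPreLoop nums 0
  let f := (List.range nums.length).foldl (altStep k nums pre) [0]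
  f.getD nums.length 0

-- ===== PRECONDITION & SPEC =====
-- Python A raises IndexError (min_f[0] on the empty list [inf]*k) exactly when k ≤ 0.
def Pre_minArraySum (_nums : List Int) (k : Int) : Prop := 1 ≤ k
instance (nums : List Int) (k : Int) : Decidable (Pre_minArraySum nums k) := by unfold Pre_minArraySum; infer_instance
def pvWitness_minArraySum : List Int × Int := ([1, 2, 3, -1], 3)

def Spec_minArraySum (nums : List Int) (k : Int) (out : Int) : Prop := out = minArraySum_alt nums k
instance (nums : List Int) (k : Int) (out : Int) : Decidable (Spec_minArraySum nums k out) := by unfold Spec_minArraySum; infer_instance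

-- ===== CLAIM (what is proved, stated in full; the proofs are below) =====
def Claim_equal_minArraySum : Prop := ∀ (nums : List Int) (k : Int), Dom_minArraySum nums k → Pre_minArraySum nums k → Spec_minArraySum nums k (minArraySum nums k)

-- ===== LEMMAS AND PROOFS =====

-- B's f-list after m outer iterations, and the f-value of prefix j
def pvFl (nums : List Int) (k : Int) (m : Nat) : List Int :=
  (List.range m).foldl (altStep k nums (0 :: altPreLoop nums 0)) [0]

def pvF (nums : List Int) (k : Int) (j : Nat) : Int := (pvFl nums k j).getD j 0

-- the content of A's table entry for residue r after processing i elements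
def pvTbl (nums : List Int) (k : Int) (i : Nat) (r : Int) : Int :=
  (List.range (i + 1)).foldl (fun b j =>
    if PySem.Int.mod ((nums.take j).sum) k = r then
      (if pvF nums k j < b then pvF nums k j else b)
    else b) pvInf

lemma getD_set_self (l : List Int) (n : Nat) (a : Int) (h : n < l.length) :
    (l.set n a).getD n 0 = a := by
  simp [List.getD_eq_getElem?_getD, h]

lemma getD_concat (l : List Int) (v : Int) (n : Nat) (h : n = l.length) :
    (l ++ [v]).getD n 0 = v := by
  subst h
  simp [List.getD_eq_getElem?_getD]

lemma getD_set_ne (l : List Int) (n m : Nat) (a : Int) (h : n ≠ m) :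
    (l.set n a).getD m 0 = l.getD m 0 := by
  simp [List.getD_eq_getElem?_getD, List.getElem?_set_ne h]

lemma pre_getD (nums : List Int) : ∀ (j : Nat) (s : Int), j ≤ nums.length →
    (s :: altPreLoop nums s).getD j 0 = s + (nums.take j).sum := by
  induction nums with
  | nil =>
      intro j s hj
      have hj0 : j = 0 := by simpa using hj
      subst hj0; simp
  | cons x t ih =>
      intro j s hj
      cases j with
      | zero => simp
      | succ j =>
          have := ih j (s + x) (by simpa using hj)
          simpa [altPreLoop, List.getD_cons_succ, add_assoc] using this

lemma pvFl_succ (nums : List Int) (k : Int) (m : Nat) :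
    pvFl nums k (m + 1) = altStep k nums (0 :: altPreLoop nums 0) (pvFl nums k m) m := by
  simp [pvFl, List.range_succ]

lemma pvFl_length (nums : List Int) (k : Int) : ∀ m, (pvFl nums k m).length = m + 1 := by
  intro m
  induction m with
  | zero => rfl
  | succ m ih => simp [pvFl_succ, altStep, ih]

lemma pvFl_getD (nums : List Int) (k : Int) :
    ∀ (m j : Nat), j ≤ m → (pvFl nums k m).getD j 0 = pvF nums k j := by
  intro m
  induction m with
  | zero => intro j hj; have hj0 : j = 0 := Nat.le_zero.mp hj; subst hj0; rfl
  | succ m ih =>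
      intro j hj
      rcases Nat.lt_or_ge j (m + 1) with h | h
      · rw [pvFl_succ]
        show (altStep _ _ _ _ _).getD j 0 = _
        unfold altStep
        rw [List.getD_append _ _ _ _ (by rw [pvFl_length]; omega)]
        exact ih j (by omega)
      · have : j = m + 1 := by omega
        subst this; rfl

lemma take_sum_succ (nums : List Int) (i : Nat) (x : Int) (rest : List Int)
    (h : nums.drop i = x :: rest) :
    (nums.take (i + 1)).sum = (nums.take i).sum + x ∧ nums.getD i 0 = x := by
  have hget : nums[i]? = some x := by
    have h0 : (nums.drop i)[0]? = some x := by rw [h]; rfl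
    rw [List.getElem?_drop] at h0
    simpa using h0
  constructor
  · rw [List.take_add_one, hget]; simp
  · simp [List.getD_eq_getElem?_getD, hget]

-- (a - b) % k == 0  ↔  a % k = b % k   (for k > 0)
lemma mod_sub_zero_iff (a b k : Int) (hk : 0 < k) :
    PySem.Int.mod (a - b) k = 0 ↔ PySem.Int.mod a k = PySem.Int.mod b k := by
  rw [PySem.Int.mod_eq_emod_of_pos hk, PySem.Int.mod_eq_emod_of_pos hk,
      PySem.Int.mod_eq_emod_of_pos hk]
  constructor
  · intro h0
    have hdvd : k ∣ a - b := Int.dvd_of_emod_eq_zero h0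
    exact Int.ModEq.symm (Int.modEq_iff_dvd.mpr hdvd)
  · intro h
    have hdvd : k ∣ a - b := Int.ModEq.dvd (Int.ModEq.symm h)
    exact Int.emod_eq_zero_of_dvd hdvd

-- B's inner scan computes exactly A's table entry for the new residue
lemma best_eq_tbl (nums : List Int) (k : Int) (hk : 0 < k) (i : Nat)
    (hin : i + 1 ≤ nums.length) :
    altBest k (0 :: altPreLoop nums 0) (pvFl nums k i) (i + 1)
      = pvTbl nums k i (PySem.Int.mod ((nums.take (i + 1)).sum) k) := by
  unfold altBest pvTbl
  apply PySem.List.foldl_congr_mem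
  intro b j hj
  have hji : j ≤ i := by
    have := List.mem_range.mp hj; omega
  rw [pre_getD nums (i + 1) 0 hin, pre_getD nums j 0 (by omega),
      pvFl_getD nums k i j hji]
  simp only [zero_add]
  have hiff := mod_sub_zero_iff ((nums.take (i + 1)).sum) ((nums.take j).sum) k hk
  by_cases hc : PySem.Int.mod ((nums.take (i + 1)).sum - (nums.take j).sum) k = 0
  · rw [if_pos hc, if_pos (hiff.mp hc).symm]
  · rw [if_neg hc, if_neg (fun h => hc (hiff.mpr h.symm))]

lemma pvTbl_succ (nums : List Int) (k : Int) (i : Nat) (r : Int) :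
    pvTbl nums k (i + 1) r =
      (if PySem.Int.mod ((nums.take (i + 1)).sum) k = r then
        (if pvF nums k (i + 1) < pvTbl nums k i r then pvF nums k (i + 1) else pvTbl nums k i r)
      else pvTbl nums k i r) := by
  unfold pvTbl
  rw [List.range_succ, List.foldl_append]
  rfl

-- B's recurrence, in terms of pvTbl
lemma pvF_succ (nums : List Int) (k : Int) (hk : 0 < k) (i : Nat) (x : Int) (rest : List Int)
    (h : nums.drop i = x :: rest) :
    pvF nums k (i + 1) =
      (let best := pvTbl nums k i (PySem.Int.mod ((nums.take i).sum + x) k)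
       let keep := pvF nums k i + x
       if keep < best then keep else best) := by
  obtain ⟨hsum, hget⟩ := take_sum_succ nums i x rest h
  have hin : i + 1 ≤ nums.length := by
    have : nums.length - i = (x :: rest).length := by rw [← h, List.length_drop]
    simp at this; omega
  show (pvFl nums k (i + 1)).getD (i + 1) 0 = _
  rw [pvFl_succ]
  simp only [altStep, Nat.add_sub_cancel]
  rw [getD_concat _ _ _ (by rw [pvFl_length])]
  rw [best_eq_tbl nums k hk i hin, hsum, hget]
  rfl

-- A's loop invariant: with f = pvF i, s = the i-th prefix residue and the table holding
-- pvTbl i, the loop computes pvF n = B's answer.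
lemma loopA (nums : List Int) (k : Int) (hk : 0 < k) :
    ∀ (rest : List Int) (i : Nat) (mf : List Int),
      nums.drop i = rest →
      i + rest.length = nums.length →
      mf.length = k.toNat →
      (∀ r : Int, 0 ≤ r → r < k → mf.getD r.toNat 0 = pvTbl nums k i r) →
      minArraySumLoop k mf (pvF nums k i) (PySem.Int.mod ((nums.take i).sum) k) rest
        = pvF nums k nums.length := by
  intro rest
  induction rest with
  | nil =>
      intro i mf hdrop hlen _ _
      have : i = nums.length := by simpa using hlen
      subst this
      rfl
  | cons x rest' ih =>
      intro i mf hdrop hlen hmfl hinv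
      obtain ⟨hsum, hget⟩ := take_sum_succ nums i x rest' hdrop
      show minArraySumLoop k mf (pvF nums k i) (PySem.Int.mod ((nums.take i).sum) k) (x :: rest') = _
      simp only [minArraySumLoop]
      -- the new residue
      have hs' : PySem.Int.mod (PySem.Int.mod ((nums.take i).sum) k + x) k
          = PySem.Int.mod ((nums.take (i + 1)).sum) k := by
        rw [hsum, PySem.Int.mod_eq_emod_of_pos hk, PySem.Int.mod_eq_emod_of_pos hk,
            PySem.Int.mod_eq_emod_of_pos hk, Int.emod_add_emod]
      set s' := PySem.Int.mod (PySem.Int.mod ((nums.take i).sum) k + x) k with hs'def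
      have hs'nonneg : 0 ≤ s' := PySem.Int.mod_nonneg _ hk
      have hs'lt : s' < k := PySem.Int.mod_lt _ hk
      have hsnat : s'.toNat < mf.length := by rw [hmfl]; omega
      have hm : mf.getD s'.toNat 0 = pvTbl nums k i s' := hinv s' hs'nonneg hs'lt
      have hres : PySem.Int.mod ((nums.take i).sum + x) k = s' := by
        rw [← hsum, ← hs']
      -- the new f value is B's pvF (i+1)
      have hf' : (if mf.getD s'.toNat 0 < pvF nums k i + x then mf.getD s'.toNat 0
            else pvF nums k i + x) = pvF nums k (i + 1) := by
        rw [pvF_succ nums k hk i x rest' hdrop, hres, hm]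
        dsimp only
        set b := pvTbl nums k i s' with hb
        set a := pvF nums k i + x with ha
        by_cases hba : b < a
        · rw [if_pos hba, if_neg (by omega)]
        · rw [if_neg hba]
          by_cases hab : a < b
          · rw [if_pos hab]
          · rw [if_neg hab]; omega
      have hle : pvF nums k (i + 1) ≤ pvTbl nums k i s' := by
        rw [pvF_succ nums k hk i x rest' hdrop, hres]
        dsimp only
        split_ifs with h
        · omega
        · omega
      rw [hf']
      -- re-establish the table invariant and recurse
      have ihx := ih (i + 1) (mf.set s'.toNat (pvF nums k (i + 1)))
        (by rw [← List.drop_drop, hdrop]; rfl)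
        (by simp only [List.length_cons] at hlen; omega)
        (by rw [List.length_set, hmfl])
        (by
          intro r hr0 hrk
          by_cases hr : r = s'
          · subst hr
            rw [getD_set_self _ _ _ hsnat, pvTbl_succ, if_pos hs'.symm]
            by_cases hlt : pvF nums k (i + 1) < pvTbl nums k i s'
            · rw [if_pos hlt]
            · rw [if_neg hlt]; omega
          · have hne : s'.toNat ≠ r.toNat := by omega
            rw [getD_set_ne _ _ _ _ hne, pvTbl_succ,
                if_neg (fun hc => hr (hs'.trans hc).symm)]
            exact hinv r hr0 hrk)
      rw [← hs'] at ihx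
      exact ihx

-- ===== VERDICT (by name: the statement is the Claim_ definition above) =====
theorem minArraySum_spec : Claim_equal_minArraySum := by
  intro nums k _ hk
  have hk' : (0 : Int) < k := hk
  unfold Spec_minArraySum minArraySum
  have h0 : PySem.Int.mod ((nums.take 0).sum) k = 0 := by
    rw [PySem.Int.mod_eq_emod_of_pos hk']; simp
  have halt : minArraySum_alt nums k = pvF nums k nums.length := rfl
  rw [halt]
  have hF0 : pvF nums k 0 = 0 := rfl
  have := loopA nums k hk' nums 0 ((List.replicate k.toNat pvInf).set 0 0)
    rfl (by simp)
    (by rw [List.length_set, List.length_replicate])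
    (by
      intro r hr0 hrk
      have hrnat : r.toNat < k.toNat := by omega
      have htbl : pvTbl nums k 0 r = if r = 0 then 0 else pvInf := by
        unfold pvTbl
        have : List.range 1 = [0] := rfl
        rw [this]
        have h00 : PySem.Int.mod (List.take 0 nums).sum k = 0 := by
          rw [PySem.Int.mod_eq_emod_of_pos hk']; simp
        simp only [List.foldl_cons, List.foldl_nil, h00]
        by_cases hr : r = 0
        · subst hr
          rw [if_pos rfl, if_pos rfl, if_pos (by unfold pvF pvFl pvInf; norm_num)]
          rfl
        · rw [if_neg (fun h => hr h.symm), if_neg hr]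
      rw [htbl]
      by_cases hr : r = 0
      · subst hr
        rw [if_pos rfl]
        exact getD_set_self _ _ _ (by rw [List.length_replicate]; omega)
      · rw [if_neg hr]
        have hne : (0 : Nat) ≠ r.toNat := by omega
        rw [getD_set_ne _ _ _ _ hne]
        simp [List.getD_eq_getElem?_getD, hrnat])
  rw [hF0, h0] at this
  exact this
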